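-- pv_equiv track=rewrite | github.com/SylvainDe/aoc | python/2015/day8.py | get_str_len_diff_decode
-- ===== SOURCE A (Python) =====
-- def get_str_len_diff_decode(s):
--     char_diff = {
--         "\\": 1,
--         '"': 1,
--         "x": 3,
--     }
--     count = 2  # first and last quotes
--     skip = False
--     for c1, c2 in zip(s, s[1:]):
--         if skip:
--             skip = False
--         elif c1 == "\\":
--             count += char_diff[c2]
--             skip = True
--     return count
-- ===== SOURCE B (Python) =====
-- def get_str_len_diff_decode(s):
--     char_diff = {
--         "\\": 1,
--         '"': 1,
--         "x": 3,
--     }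
--     total = 2  # first and last quotes
--     n = len(s)
--     i = s.find("\\")
--     while 0 <= i < n - 1:
--         total += char_diff[s[i + 1]]
--         i = s.find("\\", i + 2)
--     return total
-- ===== Notes on version B (the rewrite author's own statement) =====
-- stated objective: faster
-- what changed: Replaced the per-character zip/skip state-machine scan with a loop that uses str.find to jump directly from one backslash escape to the next, adding the per-escape difference at each hit.
import Mathlib
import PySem

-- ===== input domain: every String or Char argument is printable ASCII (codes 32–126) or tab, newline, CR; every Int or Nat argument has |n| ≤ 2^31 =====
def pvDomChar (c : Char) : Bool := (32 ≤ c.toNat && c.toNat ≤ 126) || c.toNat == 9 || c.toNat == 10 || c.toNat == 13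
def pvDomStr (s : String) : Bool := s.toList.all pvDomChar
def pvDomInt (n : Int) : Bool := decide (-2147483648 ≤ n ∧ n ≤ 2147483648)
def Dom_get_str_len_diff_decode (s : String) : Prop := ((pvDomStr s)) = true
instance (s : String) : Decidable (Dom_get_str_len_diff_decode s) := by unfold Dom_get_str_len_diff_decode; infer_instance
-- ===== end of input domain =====

-- B replaces A's per-character zip/skip state machine by a find-jump loop (s.find("\\", i)),
-- skipping directly between escape sequences; same return value, measured as a constant-factor rewrite.

-- char_diff = {"\\": 1, '"': 1, "x": 3}
def pvCharDiff : PySem.Dict Char Int :=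
  ((PySem.Dict.empty.insert '\\' 1).insert '"' 1).insert 'x' 3

-- ===== PORT A =====
-- count = 2; skip = False; for c1, c2 in zip(s, s[1:]): ...
-- (char_diff[c2] raises KeyError on an unknown escape; those inputs are excluded by Pre_, so getD's default is never used there)
def get_str_len_diff_decode (s : String) : Int :=
  let cs := s.toList
  let st := (cs.zip (PySem.List.slice cs (some 1) none)).foldl
    (fun (st : Int × Bool) p =>
      if st.2 then (st.1, false)
      else if p.1 = '\\' then (st.1 + pvCharDiff.getD p.2 0, true)
      else st) (2, false)
  st.1

-- ===== PORT B =====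
-- findFrom from a start past the string's end is -1 (CPython); needed for the loop's termination measure
theorem pvFindFrom_neg_of_gt (cs : List Char) (k : Nat) (h : cs.length < k) :
    PySem.Chars.findFrom cs ['\\'] (k : Int) = -1 := by
  simp only [PySem.Chars.findFrom]
  split
  · exfalso; omega
  · split
    · rfl
    · exfalso; omega

theorem pvFindFrom_ge (cs : List Char) (k : Nat)
    (h : 0 ≤ PySem.Chars.findFrom cs ['\\'] (k : Int)) :
    (k : Int) ≤ PySem.Chars.findFrom cs ['\\'] (k : Int) := by
  by_cases hk : k ≤ cs.length
  · exact (PySem.Chars.findFrom_natCast_spec cs ['\\'] k hk (by omega)).1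
  · have := pvFindFrom_neg_of_gt cs k (by omega)
    omega

-- while 0 <= i < n - 1: total += char_diff[s[i+1]]; i = s.find("\\", i + 2)
def pvFindLoop (cs : List Char) (start : Nat) (total : Int) : Int :=
  let i := PySem.Chars.findFrom cs ['\\'] (start : Int)
  if h : 0 ≤ i ∧ i < (cs.length : Int) - 1 then
    pvFindLoop cs (i.toNat + 2) (total + pvCharDiff.getD (PySem.List.pyGetD cs (i + 1) ' ') 0)
  else total
termination_by cs.length - start
decreasing_by
  have hge := pvFindFrom_ge cs start h.1
  omega

def get_str_len_diff_decode_alt (s : String) : Int :=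
  pvFindLoop s.toList 0 2

-- ===== PRECONDITION & SPEC =====
-- every escape sequence '\c' must have c ∈ {'\', '"', 'x'}: on any other escape the Python A
-- (and the Python B alike) raises KeyError, so exactly those strings are excluded.
def pvValidEsc : List Char → Bool
  | '\\' :: c :: rest => (c == '\\' || c == '"' || c == 'x') && pvValidEsc rest
  | _ :: rest => pvValidEsc rest
  | [] => true

def Pre_get_str_len_diff_decode (s : String) : Prop := pvValidEsc s.toList = true
instance (s : String) : Decidable (Pre_get_str_len_diff_decode s) := by
  unfold Pre_get_str_len_diff_decode; infer_instance

def pvWitness_get_str_len_diff_decode : String := "ab\\\\c\\\"d"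

def Spec_get_str_len_diff_decode (s : String) (out : Int) : Prop := out = get_str_len_diff_decode_alt s
instance (s : String) (out : Int) : Decidable (Spec_get_str_len_diff_decode s out) := by
  unfold Spec_get_str_len_diff_decode; infer_instance

-- ===== CLAIM (what is proved, stated in full; the proofs are below) =====
def Claim_equal_get_str_len_diff_decode : Prop := ∀ (s : String), Dom_get_str_len_diff_decode s → Pre_get_str_len_diff_decode s → Spec_get_str_len_diff_decode s (get_str_len_diff_decode s)

-- ===== LEMMAS AND PROOFS =====

-- the common value both loops compute: 2 + pvDiff (decoded-length difference of the escapes)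
def pvDiff : List Char → Int
  | '\\' :: c :: rest => pvCharDiff.getD c 0 + pvDiff rest
  | _ :: rest => pvDiff rest
  | [] => 0

theorem pvDiff_cons_ne (x : Char) (l : List Char) (hx : x ≠ '\\') :
    pvDiff (x :: l) = pvDiff l := by
  cases l <;> simp [pvDiff, hx]

theorem pvFoldA (cs : List Char) : ∀ acc : Int,
    ((cs.zip cs.tail).foldl
      (fun (st : Int × Bool) p =>
        if st.2 then (st.1, false)
        else if p.1 = '\\' then (st.1 + pvCharDiff.getD p.2 0, true)
        else st) (acc, false)).1 = acc + pvDiff cs := by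
  induction cs using pvDiff.induct with
  | case1 c rest ih =>
    intro acc
    cases rest with
    | nil => simp [pvDiff]
    | cons r rest' =>
      have h2 := ih (acc + pvCharDiff.getD c 0)
      simp only [List.tail_cons, List.zip_cons_cons, List.foldl_cons] at h2 ⊢
      simp only [Bool.false_eq_true, if_false, reduceIte]
      rw [show pvDiff ('\\' :: c :: r :: rest') = pvCharDiff.getD c 0 + pvDiff (r :: rest') from rfl]
      rw [h2]; ring
  | case2 x rest h ih =>
    intro acc
    cases rest with
    | nil => simp [pvDiff]
    | cons y rest' =>
      have hx : x ≠ '\\' := fun hx => h y rest' hx rfl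
      simp only [List.tail_cons, List.zip_cons_cons, List.foldl_cons]
      simp only [Bool.false_eq_true, if_false, if_neg hx]
      rw [pvDiff_cons_ne x _ hx]
      exact ih acc
  | case3 => intro acc; simp [pvDiff]

theorem pvDiff_no_esc (l : List Char) (h : ∀ (j : Nat) (hj : j + 1 < l.length), l[j] ≠ '\\') :
    pvDiff l = 0 := by
  induction l using pvDiff.induct with
  | case1 c rest ih =>
    exact absurd rfl (h 0 (by simp))
  | case2 x rest hx ih =>
    rw [show pvDiff (x :: rest) = pvDiff rest from by
      cases rest with
      | nil => simp [pvDiff]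
      | cons y r => exact pvDiff_cons_ne x _ (fun he => hx y r he rfl)]
    exact ih (fun j hj => by
      have := h (j+1) (by simp; omega)
      simpa using this)
  | case3 => rfl

theorem pvDiff_drop_congr (cs : List Char) : ∀ (a b : Nat), a ≤ b → b ≤ cs.length →
    (∀ (j : Nat) (hj : j < cs.length), a ≤ j → j < b → cs[j] ≠ '\\') →
    pvDiff (cs.drop a) = pvDiff (cs.drop b) := by
  intro a b hab
  induction hd : b - a generalizing a with
  | zero => intro _ _; have : a = b := by omega
            rw [this]
  | succ n ih =>
    intro hb h
    have ha : a < cs.length := by omega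
    have h1 : cs.drop a = cs[a] :: cs.drop (a+1) := List.drop_eq_getElem_cons ha
    rw [h1, pvDiff_cons_ne _ _ (h a ha (le_refl a) (by omega))]
    exact ih (a+1) (by omega) (by omega) hb (fun j hj h1 h2 => h j hj (by omega) h2)

theorem pvLoopB (cs : List Char) : ∀ (start : Nat), start ≤ cs.length → ∀ total : Int,
    pvFindLoop cs start total = total + pvDiff (cs.drop start) := by
  suffices H : ∀ (n start : Nat), cs.length - start ≤ n → start ≤ cs.length → ∀ total : Int,
      pvFindLoop cs start total = total + pvDiff (cs.drop start) from
    fun start hs total => H _ start le_rfl hs total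
  intro n
  induction n with
  | zero =>
    intro start hle hs total
    have hstart : start = cs.length := by omega
    rw [pvFindLoop]
    rw [dif_neg (fun hc => by
      have := pvFindFrom_ge cs start hc.1
      omega)]
    subst hstart
    simp [pvDiff]
  | succ n ih =>
    intro start hle hs total
    rw [pvFindLoop]
    by_cases hc : 0 ≤ PySem.Chars.findFrom cs ['\\'] (start : Int) ∧
        PySem.Chars.findFrom cs ['\\'] (start : Int) < (cs.length : Int) - 1
    · rw [dif_pos hc]
      set i := PySem.Chars.findFrom cs ['\\'] (start : Int) with hi
      obtain ⟨hg, h2, h3⟩ := PySem.Chars.findFrom_natCast_spec cs ['\\'] start hs (by omega)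
      rw [← hi] at hg h2 h3
      have hiN : i.toNat < cs.length := by omega
      have hi1 : i.toNat + 1 < cs.length := by omega
      have hbs : cs[i.toNat] = '\\' := by
        rw [List.drop_eq_getElem_cons hiN] at h2
        obtain ⟨t, ht⟩ := h2
        injection ht with h4 _
        exact h4.symm
      have hskip : pvDiff (cs.drop start) = pvDiff (cs.drop i.toNat) := by
        apply pvDiff_drop_congr cs start i.toNat (by omega) (by omega)
        intro j hj hj1 hj2 hbsj
        apply h3 j hj1 hj2
        rw [List.drop_eq_getElem_cons hj, hbsj]
        exact ⟨_, rfl⟩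
      have hexp : pvDiff (cs.drop i.toNat)
          = pvCharDiff.getD cs[i.toNat + 1] 0 + pvDiff (cs.drop (i.toNat + 2)) := by
        rw [List.drop_eq_getElem_cons hiN, List.drop_eq_getElem_cons hi1, hbs]
        rfl
      have hval : PySem.List.pyGetD cs (i + 1) ' ' = cs[i.toNat + 1] := by
        rw [PySem.List.pyGetD_eq_getElem cs ' ' (by omega) (by omega)]
        have hT : (i + 1).toNat = i.toNat + 1 := by omega
        simp only [hT]
      rw [ih (i.toNat + 2) (by omega) (by omega)]
      rw [hskip, hexp, hval]
      ring
    · rw [dif_neg hc]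
      have hzero : pvDiff (cs.drop start) = 0 := by
        by_cases h1 : 0 ≤ PySem.Chars.findFrom cs ['\\'] (start : Int)
        · set i := PySem.Chars.findFrom cs ['\\'] (start : Int) with hi
          obtain ⟨hg, h2, h3⟩ := PySem.Chars.findFrom_natCast_spec cs ['\\'] start hs (by omega)
          rw [← hi] at hg h2 h3
          have hiN : i.toNat < cs.length := by
            by_contra hcon
            rw [List.drop_eq_nil_of_le (by omega)] at h2
            simp [List.prefix_nil] at h2
          apply pvDiff_no_esc
          intro j hj hbsj
          simp only [List.length_drop] at hj
          rw [List.getElem_drop] at hbsj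
          refine h3 (start + j) (by omega) (by omega) ?_
          rw [List.drop_eq_getElem_cons (by omega), hbsj]
          exact ⟨_, rfl⟩
        · by_cases hm1 : PySem.Chars.findFrom cs ['\\'] (start : Int) = -1
          · have hninf := (PySem.Chars.findFrom_natCast_eq_neg_one_iff cs ['\\'] start hs).mp hm1
            rw [List.singleton_infix_iff] at hninf
            apply pvDiff_no_esc
            intro j hj hbsj
            exact hninf (hbsj ▸ List.getElem_mem _)
          · obtain ⟨hg, _, _⟩ := PySem.Chars.findFrom_natCast_spec cs ['\\'] start hs hm1
            omega
      rw [hzero]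
      ring

-- ===== VERDICT (by name: the statement is the Claim_ definition above) =====
theorem get_str_len_diff_decode_spec : Claim_equal_get_str_len_diff_decode := by
  intro s _ _
  unfold Spec_get_str_len_diff_decode
  simp only [get_str_len_diff_decode, get_str_len_diff_decode_alt, PySem.List.slice_from_one]
  rw [pvFoldA, pvLoopB s.toList 0 (by omega) 2]
  simp
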